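-- pv_equiv track=rewrite | github.com/gaigenticai/AgenticAI | services/ui-quality-verification-service/main.py | _generate_responsive_recommendations
-- ===== SOURCE A (Python) =====
-- from typing import Any, Dict, List, Optional, Union, Callable
--
-- def _generate_responsive_recommendations(issues: List[str]) -> List[str]:
--     """Generate responsive design improvement recommendations"""
--     recommendations = []
--
--     if any("horizontal_scroll" in issue for issue in issues):
--         recommendations.append("Fix horizontal scrolling by improving responsive layouts")
--
--     if any("touch_targets" in issue for issue in issues):
--         recommendations.append("Increase touch target sizes for mobile devices (minimum 44px)")
--
--     if any("layout_broken" in issue for issue in issues):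
--         recommendations.append("Fix broken layouts by improving CSS media queries and flexbox/grid usage")
--
--     if not issues:
--         recommendations.append("Responsive design is well implemented across all devices")
--
--     return recommendations
-- ===== SOURCE B (Python) =====
-- def _generate_responsive_recommendations(issues):
--     """Generate responsive design improvement recommendations (single pass over issues)."""
--     seen = horiz = touch = layout = False
--     for issue in issues:
--         seen = True
--         horiz = horiz or ("horizontal_scroll" in issue)
--         touch = touch or ("touch_targets" in issue)
--         layout = layout or ("layout_broken" in issue)
--     recommendations = []
--     if horiz:
--         recommendations.append("Fix horizontal scrolling by improving responsive layouts")
--     if touch: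
--         recommendations.append("Increase touch target sizes for mobile devices (minimum 44px)")
--     if layout:
--         recommendations.append("Fix broken layouts by improving CSS media queries and flexbox/grid usage")
--     if not seen:
--         recommendations.append("Responsive design is well implemented across all devices")
--     return recommendations
-- ===== Notes on version B (the rewrite author's own statement) =====
-- stated objective: alternative
-- what changed: Replaces three separate any(...) scans over the issue list by a single pass that accumulates four booleans (seen, horizontal, touch, layout), then emits the recommendations in the same fixed order from those flags.
import Mathlib
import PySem

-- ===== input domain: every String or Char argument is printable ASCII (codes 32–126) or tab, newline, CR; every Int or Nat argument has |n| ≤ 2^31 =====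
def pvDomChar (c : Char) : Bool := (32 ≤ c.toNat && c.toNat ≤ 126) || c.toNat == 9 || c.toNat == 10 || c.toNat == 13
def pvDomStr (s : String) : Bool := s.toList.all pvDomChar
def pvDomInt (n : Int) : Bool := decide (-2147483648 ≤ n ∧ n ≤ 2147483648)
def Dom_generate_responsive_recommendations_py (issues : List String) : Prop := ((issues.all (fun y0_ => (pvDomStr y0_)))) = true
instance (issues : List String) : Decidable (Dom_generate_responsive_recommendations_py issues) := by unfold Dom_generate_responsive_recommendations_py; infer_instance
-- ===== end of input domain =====

-- B replaces A's three separate any(...) scans by one pass accumulating four booleans (alternative decomposition, same cost class).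


-- ===== PORT A =====
def generate_responsive_recommendations_py (issues : List String) : List String :=
  let recommendations : List String := []
  let recommendations :=
    if issues.any (fun issue => PySem.Str.isIn "horizontal_scroll" issue) then
      recommendations ++ ["Fix horizontal scrolling by improving responsive layouts"]
    else recommendations
  let recommendations :=
    if issues.any (fun issue => PySem.Str.isIn "touch_targets" issue) then
      recommendations ++ ["Increase touch target sizes for mobile devices (minimum 44px)"]
    else recommendations
  let recommendations :=
    if issues.any (fun issue => PySem.Str.isIn "layout_broken" issue) then
      recommendations ++ ["Fix broken layouts by improving CSS media queries and flexbox/grid usage"]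
    else recommendations
  let recommendations :=
    if issues.isEmpty then
      recommendations ++ ["Responsive design is well implemented across all devices"]
    else recommendations
  recommendations

-- ===== PORT B =====
-- loop body of B: (seen, horiz, touch, layout)
def pvAltStep (st : Bool × Bool × Bool × Bool) (issue : String) : Bool × Bool × Bool × Bool :=
  (true,
   st.2.1 || PySem.Str.isIn "horizontal_scroll" issue,
   st.2.2.1 || PySem.Str.isIn "touch_targets" issue,
   st.2.2.2 || PySem.Str.isIn "layout_broken" issue)

def generate_responsive_recommendations_py_alt (issues : List String) : List String :=
  let st := issues.foldl pvAltStep (false, false, false, false)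
  (if st.2.1 then ["Fix horizontal scrolling by improving responsive layouts"] else []) ++
  (if st.2.2.1 then ["Increase touch target sizes for mobile devices (minimum 44px)"] else []) ++
  (if st.2.2.2 then ["Fix broken layouts by improving CSS media queries and flexbox/grid usage"] else []) ++
  (if !st.1 then ["Responsive design is well implemented across all devices"] else [])

-- ===== PRECONDITION & SPEC =====
def Spec_generate_responsive_recommendations_py (issues : List String) (out : List String) : Prop := out = generate_responsive_recommendations_py_alt issues
instance (issues : List String) (out : List String) : Decidable (Spec_generate_responsive_recommendations_py issues out) := by unfold Spec_generate_responsive_recommendations_py; infer_instance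

-- ===== CLAIM (what is proved, stated in full; the proofs are below) =====
def Claim_equal_generate_responsive_recommendations_py : Prop := ∀ (issues : List String), Dom_generate_responsive_recommendations_py issues → Spec_generate_responsive_recommendations_py issues (generate_responsive_recommendations_py issues)

-- ===== LEMMAS AND PROOFS =====
-- B's fold computes exactly the "seen" flag and A's three any-scans.
theorem pvAltStep_foldl (issues : List String) (b h t l : Bool) :
    issues.foldl pvAltStep (b, h, t, l) =
      (b || !issues.isEmpty,
       h || issues.any (fun issue => PySem.Str.isIn "horizontal_scroll" issue),
       t || issues.any (fun issue => PySem.Str.isIn "touch_targets" issue),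
       l || issues.any (fun issue => PySem.Str.isIn "layout_broken" issue)) := by
  induction issues generalizing b h t l with
  | nil => simp
  | cons x xs ih =>
      simp only [List.foldl_cons, pvAltStep, ih, List.any_cons, List.isEmpty_cons]
      simp [Bool.or_assoc]

-- ===== VERDICT (by name: the statement is the Claim_ definition above) =====
theorem generate_responsive_recommendations_py_spec : Claim_equal_generate_responsive_recommendations_py := by
  intro issues _
  show _ = _
  simp only [generate_responsive_recommendations_py, generate_responsive_recommendations_py_alt,
    pvAltStep_foldl, Bool.false_or]
  cases hE : issues.isEmpty <;>
    cases issues.any (fun issue => PySem.Str.isIn "horizontal_scroll" issue) <;>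
    cases issues.any (fun issue => PySem.Str.isIn "touch_targets" issue) <;>
    cases issues.any (fun issue => PySem.Str.isIn "layout_broken" issue) <;>
    simp
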